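-- pv_equiv track=rewrite | github.com/Rozmyslova/PythonHomeWork | HW25task.py | get_new_seq
-- ===== SOURCE A (Python) =====
-- def get_new_seq(seq):
--     set_new_seq = set()
--     for x in range(len(seq)):
--         new_seq = [seq[x]]
--         for k in seq:
--             if k > max(new_seq):
--                 new_seq.append(k)
--             if len(new_seq) >= 2:
--                 new_seq_tuple = tuple(new_seq)
--                 set_new_seq.add(new_seq_tuple)
--     list_new_seq = list(set_new_seq)
--     return list_new_seq
-- ===== SOURCE B (Python) =====
-- def get_new_seq(seq):
--     # Two staged passes: precompute the strict prefix-record elements of seq once,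
--     # then each start's greedy chain is just that record list filtered above the start value.
--     records = []
--     cur = None
--     for k in seq:
--         if cur is None or k > cur:
--             records.append(k)
--             cur = k
--     found = set()
--     for v in seq:
--         chain = [v] + [r for r in records if r > v]
--         for i in range(2, len(chain) + 1):
--             found.add(tuple(chain[:i]))
--     return list(found)
-- ===== Notes on version B (the rewrite author's own statement) =====
-- stated objective: alternative
-- what changed: B computes the strict prefix-record (running-maximum) elements of seq once in a single pass; each start's greedy chain is then obtained by filtering that record list above the start value, and its prefixes of length >= 2 are added by slicing, so A's per-start greedy rescans with max() recomputation disappear.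
import Mathlib
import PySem

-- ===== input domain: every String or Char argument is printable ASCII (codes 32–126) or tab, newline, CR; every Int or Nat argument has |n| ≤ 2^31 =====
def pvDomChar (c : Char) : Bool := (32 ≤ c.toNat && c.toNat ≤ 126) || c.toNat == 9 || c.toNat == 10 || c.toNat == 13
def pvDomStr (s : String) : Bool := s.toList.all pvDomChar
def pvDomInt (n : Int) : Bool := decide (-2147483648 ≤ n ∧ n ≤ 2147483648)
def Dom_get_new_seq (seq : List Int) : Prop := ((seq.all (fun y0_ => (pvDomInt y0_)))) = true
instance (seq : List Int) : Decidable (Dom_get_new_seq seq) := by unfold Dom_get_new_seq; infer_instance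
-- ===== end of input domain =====

-- B precomputes the strict prefix-record list of seq once and builds each start's chain by filtering
-- it, adding the chain's prefixes by slicing, instead of re-running the greedy scan with max() per
-- start (objective: alternative; the return value is a Python set listed out, compared as a set).

-- ===== PORT A =====
-- inner loop body: append k when k > max(new_seq), then add the tuple when len(new_seq) >= 2
-- (new_seq is never empty, so Python's max(new_seq) never raises; ported as (max? …).getD 0)
def pvAStep (st : PySem.Set (List Int) × List Int) (k : Int) : PySem.Set (List Int) × List Int :=
  let new_seq := if (PySem.List.max? st.2 (fun y => y)).getD 0 < k then st.2 ++ [k] else st.2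
  let s := if 2 ≤ new_seq.length then PySem.Set.add st.1 new_seq else st.1
  (s, new_seq)

def get_new_seq (seq : List Int) : List (List Int) :=
  (PySem.List.pyRange 0 (PySem.List.len seq) 1).foldl
    (fun set_new_seq x =>
      (seq.foldl pvAStep (set_new_seq, [PySem.List.pyGetD seq x 0])).1)
    PySem.Set.empty

-- ===== PORT B =====
-- first pass: records of seq ('if cur is None or k > cur'); state (records, cur : Option Int)
def pvRecStep (st : List Int × Option Int) (k : Int) : List Int × Option Int :=
  match st.2 with
  | none => (st.1 ++ [k], some k)
  | some c => if c < k then (st.1 ++ [k], some k) else st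

def get_new_seq_alt (seq : List Int) : List (List Int) :=
  let records := (seq.foldl pvRecStep ([], none)).1
  seq.foldl
    (fun found v =>
      let chain := v :: records.filter (fun r => decide (v < r))
      (PySem.List.pyRange 2 (PySem.List.len chain + 1) 1).foldl
        (fun s i => PySem.Set.add s (PySem.List.slice chain none (some i))) found)
    PySem.Set.empty

-- ===== PRECONDITION & SPEC =====
def Spec_get_new_seq (seq : List Int) (out : List (List Int)) : Prop := out = get_new_seq_alt seq
instance (seq : List Int) (out : List (List Int)) : Decidable (Spec_get_new_seq seq out) := by unfold Spec_get_new_seq; infer_instance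

-- ===== CLAIM (what is proved, stated in full; the proofs are below) =====
def Claim_equal_get_new_seq : Prop := ∀ (seq : List Int), Dom_get_new_seq seq → Spec_get_new_seq seq (get_new_seq seq)

-- ===== LEMMAS AND PROOFS =====

-- the greedy record subsequence of ks above threshold m (what A's inner loop appends)
def pvRecAbove (m : Int) : List Int → List Int
  | [] => []
  | k :: ks => if m < k then k :: pvRecAbove k ks else pvRecAbove m ks

-- one append step: extend the prefix and record it
def pvAddPref (st : PySem.Set (List Int) × List Int) (r : Int) : PySem.Set (List Int) × List Int :=
  (PySem.Set.add st.1 (st.2 ++ [r]), st.2 ++ [r])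

-- the prefixes of p extended successively by ext
def pvPrefs (p : List Int) : List Int → List (List Int)
  | [] => []
  | r :: rs => (p ++ [r]) :: pvPrefs (p ++ [r]) rs

-- max(p) = m when m is a member and an upper bound of p
theorem pv_max_eq {p : List Int} {m : Int} (hm : m ∈ p) (hub : ∀ y ∈ p, y ≤ m) :
    (PySem.List.max? p (fun y => y)).getD 0 = m := by
  cases p with
  | nil => cases hm
  | cons a t =>
    rw [PySem.List.max?_id_cons]
    simp only [Option.getD_some]
    apply le_antisymm
    · rcases PySem.List.foldl_max_mem t a with h | h
      · rw [h]; exact hub a (by simp)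
      · exact hub _ (List.mem_cons_of_mem a h)
    · rcases List.mem_cons.mp hm with rfl | hmt
      · exact (PySem.List.le_foldl_max t m).1
      · exact (PySem.List.le_foldl_max t a).2 m hmt

theorem pv_mem_recAbove : ∀ (ks : List Int) (m r : Int), r ∈ pvRecAbove m ks → m < r := by
  intro ks
  induction ks with
  | nil => intro m r h; cases h
  | cons k rest ih =>
    intro m r h
    by_cases hk : m < k
    · simp only [pvRecAbove, if_pos hk] at h
      rcases List.mem_cons.mp h with rfl | h
      · exact hk
      · exact lt_trans hk (ih k r h)
    · simp only [pvRecAbove, if_neg hk] at h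
      exact ih m r h

-- filtering a record list above a higher threshold is the record list of that threshold
theorem pv_filter_recAbove : ∀ (ks : List Int) (w m : Int), w ≤ m →
    (pvRecAbove w ks).filter (fun r => decide (m < r)) = pvRecAbove m ks := by
  intro ks
  induction ks with
  | nil => intro w m _; rfl
  | cons k rest ih =>
    intro w m hwm
    by_cases hwk : w < k
    · simp only [pvRecAbove, if_pos hwk]
      by_cases hmk : m < k
      · rw [if_pos hmk, List.filter_cons_of_pos (by simpa using hmk)]
        congr 1
        apply List.filter_eq_self.mpr
        intro r hr
        simpa using lt_trans hmk (pv_mem_recAbove rest k r hr)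
      · rw [if_neg hmk, List.filter_cons_of_neg (by simpa using hmk)]
        exact ih k m (by omega)
    · simp only [pvRecAbove, if_neg hwk]
      by_cases hmk : m < k
      · omega
      · rw [if_neg hmk]
        exact ih w m hwm
    
-- first component of B's record-building fold, once the state is 'some m'
theorem pv_recStep_some : ∀ (ks : List Int) (acc : List Int) (m : Int),
    ∃ m', (ks.foldl pvRecStep (acc, some m)) = (acc ++ pvRecAbove m ks, some m') := by
  intro ks
  induction ks with
  | nil => intro acc m; exact ⟨m, by simp [pvRecAbove]⟩
  | cons k rest ih =>
    intro acc m
    by_cases hk : m < k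
    · obtain ⟨m', hm'⟩ := ih (acc ++ [k]) k
      exact ⟨m', by simp [pvRecStep, hk, pvRecAbove, hm']⟩
    · obtain ⟨m', hm'⟩ := ih acc m
      exact ⟨m', by simp [pvRecStep, hk, pvRecAbove, hm']⟩

-- B's records list, filtered above v, is A's greedy append list for start v
theorem pv_records_filter (seq : List Int) (v : Int) :
    ((seq.foldl pvRecStep ([], none)).1).filter (fun r => decide (v < r)) = pvRecAbove v seq := by
  cases seq with
  | nil => rfl
  | cons k rest =>
    obtain ⟨m', hm'⟩ := pv_recStep_some rest [k] k
    simp only [List.foldl_cons, pvRecStep, List.nil_append, hm', List.singleton_append,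
      List.filter_cons]
    by_cases hvk : v < k
    · simp only [pvRecAbove, if_pos hvk, decide_eq_true hvk, if_true]
      congr 1
      apply List.filter_eq_self.mpr
      intro r hr
      simpa using lt_trans hvk (pv_mem_recAbove rest k r hr)
    · simp only [pvRecAbove, if_neg hvk, decide_eq_false hvk]
      exact pv_filter_recAbove rest k v (by omega)

-- inner-loop invariant: A's scan of ks equals the pvAddPref fold over the record list above m
theorem pv_inner (ks : List Int) :
    ∀ (s : PySem.Set (List Int)) (p : List Int) (m : Int),
      m ∈ p → (∀ y ∈ p, y ≤ m) → (2 ≤ p.length → p ∈ s) →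
      ks.foldl pvAStep (s, p) = (pvRecAbove m ks).foldl pvAddPref (s, p) := by
  induction ks with
  | nil => intro s p m _ _ _; rfl
  | cons k rest ih =>
    intro s p m hm hub hrec
    simp only [List.foldl_cons]
    by_cases hlt : m < k
    · have hp : 1 ≤ p.length :=
        List.length_pos_iff.mpr (by rintro rfl; cases hm)
      have hA : pvAStep (s, p) k = (PySem.Set.add s (p ++ [k]), p ++ [k]) := by
        simp only [pvAStep, pv_max_eq hm hub, if_pos hlt]
        rw [if_pos (by simp; omega : 2 ≤ (p ++ [k]).length)]
      rw [hA]
      simp only [pvRecAbove, if_pos hlt, List.foldl_cons, pvAddPref]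
      apply ih
      · simp
      · intro y hy
        rcases List.mem_append.mp hy with hy | hy
        · exact le_of_lt (lt_of_le_of_lt (hub y hy) hlt)
        · simp at hy; subst hy; exact le_refl _
      · intro _
        exact (PySem.Set.mem_add s (p ++ [k]) (p ++ [k])).mpr (Or.inr rfl)
    · have hA : pvAStep (s, p) k = (s, p) := by
        by_cases h2 : 2 ≤ p.length
        · simp [pvAStep, pv_max_eq hm hub, hlt, h2, PySem.Set.add_of_mem (hrec h2)]
        · simp [pvAStep, pv_max_eq hm hub, hlt, h2]
      rw [hA]
      simp only [pvRecAbove, if_neg hlt]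
      exact ih s p m hm hub hrec

-- the pvAddPref fold records exactly the successive prefixes
theorem pv_addPref_fold : ∀ (ext : List Int) (s : PySem.Set (List Int)) (p : List Int),
    (ext.foldl pvAddPref (s, p)).1 = (pvPrefs p ext).foldl PySem.Set.add s := by
  intro ext
  induction ext with
  | nil => intro s p; rfl
  | cons r rs ih =>
    intro s p
    simp only [List.foldl_cons, pvAddPref, pvPrefs]
    exact ih _ _

-- pvPrefs as takes of the full chain
theorem pv_prefs_eq_takes : ∀ (ext p : List Int),
    pvPrefs p ext = (List.range ext.length).map (fun j => p ++ ext.take (j + 1)) := by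
  intro ext
  induction ext with
  | nil => intro p; rfl
  | cons r rs ih =>
    intro p
    simp only [pvPrefs, ih (p ++ [r]), List.length_cons, List.range_succ_eq_map,
      List.map_cons, List.map_map]
    refine congrArg₂ List.cons (by simp) ?_
    apply List.map_congr_left
    intro j _
    simp [Function.comp, List.take_succ_cons, List.append_assoc]

-- B's slice loop over range(2, len(chain)+1) is the pvPrefs fold
theorem pv_B_inner (v : Int) (ext : List Int) (s : PySem.Set (List Int)) :
    (PySem.List.pyRange 2 (PySem.List.len (v :: ext) + 1) 1).foldl
        (fun s i => PySem.Set.add s (PySem.List.slice (v :: ext) none (some i))) s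
      = (pvPrefs [v] ext).foldl PySem.Set.add s := by
  rw [PySem.List.pyRange_one, List.foldl_map, pv_prefs_eq_takes, List.foldl_map]
  have hlen : ((PySem.List.len (v :: ext) + 1 - 2).toNat) = ext.length := by
    simp only [PySem.List.len_eq, List.length_cons]
    omega
  rw [hlen]
  congr 1
  funext acc k
  have h2k : (2 : Int) + (k : Int) = ((k + 2 : Nat) : Int) := by push_cast; ring
  rw [h2k, PySem.List.slice_to_natCast]
  simp [show k + 2 = (k + 1) + 1 from rfl, List.take_succ_cons]

-- ===== VERDICT (by name: the statement is the Claim_ definition above) =====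
theorem get_new_seq_spec : Claim_equal_get_new_seq := by
  intro seq _
  unfold Spec_get_new_seq get_new_seq get_new_seq_alt
  rw [show (PySem.List.pyRange 0 (PySem.List.len seq) 1).foldl
        (fun set_new_seq x => (seq.foldl pvAStep (set_new_seq, [PySem.List.pyGetD seq x 0])).1)
        PySem.Set.empty
      = ((PySem.List.pyRange 0 (PySem.List.len seq) 1).map
          (fun j => PySem.List.pyGetD seq j 0)).foldl
          (fun set_new_seq start => (seq.foldl pvAStep (set_new_seq, [start])).1)
          PySem.Set.empty from
        (List.foldl_map (f := fun j => PySem.List.pyGetD seq j 0)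
          (g := fun (s : PySem.Set (List Int)) (start : Int) =>
            (seq.foldl pvAStep (s, [start])).1)).symm]
  rw [PySem.List.map_pyGetD_pyRange_zero]
  have hfun : (fun (s : PySem.Set (List Int)) (start : Int) =>
        (seq.foldl pvAStep (s, [start])).1)
      = (fun found v =>
          (PySem.List.pyRange 2
              (PySem.List.len
                (v :: ((seq.foldl pvRecStep ([], none)).1).filter (fun r => decide (v < r))) + 1) 1).foldl
            (fun s i => PySem.Set.add s
              (PySem.List.slice
                (v :: ((seq.foldl pvRecStep ([], none)).1).filter (fun r => decide (v < r)))
                none (some i))) found) := by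
    funext s v
    rw [pv_inner seq s [v] v (by simp) (by simp) (by simp),
      pv_addPref_fold, pv_records_filter, pv_B_inner]
  rw [hfun]
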